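-- pv_equiv track=rewrite | github.com/alexandrglm/python-course | Python01-Basics/00-Manual_Incremental_Matrix_Function-Example.py | manualIncrementingMatrix
-- ===== SOURCE A (Python) =====
-- def manualIncrementingMatrix(n):
--   matrix = [ [ None for y in range(n) ] for x  in range(n)  ]
--
--   counter = 0
--
--   for idx, el in enumerate(matrix):
--
--     for nested_idx, nested_elel in enumerate(el):
--         matrix[idx][nested_idx] = counter + nested_idx
--
--         counter += 1
--
--   return matrix
-- ===== SOURCE B (Python) =====
-- def manualIncrementingMatrix(n):
--     # Closed form: the running counter at row i, column j equals i*n + j,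
--     # so the stored cell value counter + j is i*n + 2*j.
--     return [[i * n + 2 * j for j in range(n)] for i in range(n)]
-- ===== Notes on version B (the rewrite author's own statement) =====
-- stated objective: simpler
-- what changed: B replaces A's None-filled matrix, in-place cell mutation and sequentially incremented counter by the closed-form cell formula matrix[i][j] = i*n + 2*j computed directly from the indices.
import Mathlib
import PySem

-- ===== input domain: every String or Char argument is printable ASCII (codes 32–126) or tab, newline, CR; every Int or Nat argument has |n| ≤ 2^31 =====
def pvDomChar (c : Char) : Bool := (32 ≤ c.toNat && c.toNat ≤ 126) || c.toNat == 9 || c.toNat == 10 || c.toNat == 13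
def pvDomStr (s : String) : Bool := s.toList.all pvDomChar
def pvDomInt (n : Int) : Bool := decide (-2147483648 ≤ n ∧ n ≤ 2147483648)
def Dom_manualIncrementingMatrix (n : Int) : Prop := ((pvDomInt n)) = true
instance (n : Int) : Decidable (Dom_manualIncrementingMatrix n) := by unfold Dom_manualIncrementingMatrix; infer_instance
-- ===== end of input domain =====

-- B replaces A's running counter and in-place mutation by the closed-form cell value i*n + 2*j (objective: simpler).

-- ===== PORT A =====
-- Python's None placeholders are modelled as (0 : Int); every cell is overwritten before the matrix is returned,
-- so the placeholder value is never observable. matrix[idx] / matrix[idx][j] assignments (always in range in A)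
-- are modelled with List.set / List.getD.
def manualIncrementingMatrix (n : Int) : List (List Int) :=
  let matrix : List (List Int) :=
    (PySem.List.pyRange 0 n 1).map (fun _x => (PySem.List.pyRange 0 n 1).map (fun _y => (0 : Int)))
  let st :=
    (PySem.List.enumerate matrix).foldl
      (fun (st : List (List Int) × Int) (p : Int × List Int) =>
        (PySem.List.enumerate p.2).foldl
          (fun (st2 : List (List Int) × Int) (q : Int × Int) =>
            (st2.1.set p.1.toNat ((st2.1.getD p.1.toNat []).set q.1.toNat (st2.2 + q.1)),
             st2.2 + 1))
          st)
      (matrix, 0)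
  st.1

-- ===== PORT B =====
def manualIncrementingMatrix_alt (n : Int) : List (List Int) :=
  (PySem.List.pyRange 0 n 1).map (fun i => (PySem.List.pyRange 0 n 1).map (fun j => i * n + 2 * j))

-- ===== PRECONDITION & SPEC =====
def Spec_manualIncrementingMatrix (n : Int) (out : List (List Int)) : Prop := out = manualIncrementingMatrix_alt n
instance (n : Int) (out : List (List Int)) : Decidable (Spec_manualIncrementingMatrix n out) := by unfold Spec_manualIncrementingMatrix; infer_instance

-- ===== CLAIM (what is proved, stated in full; the proofs are below) =====
def Claim_equal_manualIncrementingMatrix : Prop := ∀ (n : Int), Dom_manualIncrementingMatrix n → Spec_manualIncrementingMatrix n (manualIncrementingMatrix n)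

-- ===== LEMMAS AND PROOFS =====

-- The effect of A's inner loop on the row it mutates, as a standalone recursion.
def pvRowAux : List Int → Int → List Int → Int → List Int
  | [], _, r, _ => r
  | _ :: xs, s, r, c => pvRowAux xs (s + 1) (r.set s.toNat (c + s)) (c + 1)

-- Stage 1: the inner fold of port A only rewrites row idx (via pvRowAux) and advances the counter by el.length.
theorem pvInnerFold (el : List Int) : ∀ (s : Int) (mat : List (List Int)) (c : Int) (idx : Int),
    idx.toNat < mat.length →
    (PySem.List.enumerate el s).foldl
      (fun (st2 : List (List Int) × Int) (q : Int × Int) =>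
        (st2.1.set idx.toNat ((st2.1.getD idx.toNat []).set q.1.toNat (st2.2 + q.1)),
         st2.2 + 1)) (mat, c)
    = (mat.set idx.toNat (pvRowAux el s (mat.getD idx.toNat []) c), c + el.length) := by
  induction el with
  | nil =>
    intro s mat c idx h
    simp only [PySem.List.enumerate_nil, List.foldl_nil, pvRowAux, List.length_nil,
      Int.natCast_zero, Int.add_zero]
    rw [List.getD_eq_getElem mat [] h, List.set_getElem_self h]
  | cons x xs ih =>
    intro s mat c idx hidx
    rw [PySem.List.enumerate_cons, List.foldl_cons]
    have h1 : ((mat.set idx.toNat ((mat.getD idx.toNat []).set s.toNat (c + s))).getD idx.toNat [])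
        = (mat.getD idx.toNat []).set s.toNat (c + s) := by
      simp [List.getD, List.getElem?_set_self hidx]
    rw [ih (s + 1) _ (c + 1) idx (by simpa using hidx)]
    rw [h1, List.set_set]
    simp only [pvRowAux, List.length_cons]
    congr 1
    push_cast; ring

-- Stage 2: closed form of pvRowAux on a row that is exactly long enough.
theorem pvRowAux_eq (el : List Int) : ∀ (s : Int) (r : List Int) (c : Int),
    0 ≤ s → r.length = s.toNat + el.length →
    pvRowAux el s r c = r.take s.toNat ++ (List.range el.length).map (fun j : Nat => c + s + 2 * (j : Int)) := by
  induction el with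
  | nil =>
    intro s r c hs hlen
    simp only [pvRowAux, List.length_nil, List.range_zero, List.map_nil, List.append_nil]
    have h : r.length ≤ s.toNat := by simp at hlen; omega
    exact (List.take_of_length_le h).symm
  | cons x xs ih =>
    intro s r c hs hlen
    have hslt : s.toNat < r.length := by simp at hlen; omega
    rw [pvRowAux, ih (s + 1) _ (c + 1) (by omega) (by simp at hlen ⊢; omega)]
    have hset : r.set s.toNat (c + s) = r.take s.toNat ++ (c + s) :: r.drop (s.toNat + 1) :=
      List.set_eq_take_cons_drop _ hslt
    have htake : (r.set s.toNat (c + s)).take ((s + 1).toNat)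
        = r.take s.toNat ++ [c + s] := by
      rw [hset]
      have h1 : (s + 1).toNat = s.toNat + 1 := by omega
      rw [h1, List.take_append]
      have hl : (List.take s.toNat r).length = s.toNat := by
        simp [List.length_take, Nat.min_eq_left (le_of_lt hslt)]
      rw [hl, List.take_take]
      have h2 : min (s.toNat + 1) s.toNat = s.toNat := by omega
      rw [h2]
      simp
    rw [htake]
    have hr : (List.range (xs.length + 1)).map (fun j : Nat => c + s + 2 * (j : Int))
        = (c + s) :: (List.range xs.length).map (fun j : Nat => (c + 1) + (s + 1) + 2 * (j : Int)) := by
      rw [List.range_succ_eq_map]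
      simp only [List.map_cons, List.map_map]
      congr 1
      · push_cast; ring
      · apply List.map_congr_left
        intro j _
        simp only [Function.comp_apply]
        push_cast
        ring
    rw [List.length_cons, hr]
    simp

-- Stage 3: the outer fold over the remaining all-zero rows, with already-built prefix `done`.
theorem pvOuterFold (m : Nat) (t : Nat) : ∀ (done : List (List Int)) (c : Int),
    (PySem.List.enumerate (List.replicate t (List.replicate m (0 : Int))) (done.length : Int)).foldl
      (fun (st : List (List Int) × Int) (p : Int × List Int) =>
        (PySem.List.enumerate p.2).foldl
          (fun (st2 : List (List Int) × Int) (q : Int × Int) =>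
            (st2.1.set p.1.toNat ((st2.1.getD p.1.toNat []).set q.1.toNat (st2.2 + q.1)),
             st2.2 + 1))
          st)
      (done ++ List.replicate t (List.replicate m (0 : Int)), c)
    = (done ++ (List.range t).map (fun i : Nat => (List.range m).map (fun j : Nat => c + (i : Int) * m + 2 * (j : Int))),
       c + t * m) := by
  induction t with
  | zero => intro done c; simp [PySem.List.enumerate_nil]
  | succ t ih =>
    intro done c
    rw [List.replicate_succ, PySem.List.enumerate_cons, List.foldl_cons]
    have hidx : ((done.length : Int)).toNat
        < (done ++ List.replicate m (0:Int) :: List.replicate t (List.replicate m (0:Int))).length := by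
      simp
    rw [pvInnerFold _ _ _ c (done.length : Int) hidx]
    simp only [List.length_replicate]
    have hgetd : ((done ++ List.replicate m (0:Int) :: List.replicate t (List.replicate m (0:Int))).getD
          ((done.length : Int)).toNat []) = List.replicate m (0 : Int) := by
      simp [List.getD]
    rw [hgetd]
    have hrow : pvRowAux (List.replicate m (0:Int)) 0 (List.replicate m (0:Int)) c
        = (List.range m).map (fun j : Nat => c + 2 * (j : Int)) := by
      rw [pvRowAux_eq _ 0 _ c le_rfl (by simp)]
      simp
    rw [hrow]
    have hset : (done ++ List.replicate m (0:Int) :: List.replicate t (List.replicate m (0:Int))).set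
          ((done.length : Int)).toNat ((List.range m).map (fun j : Nat => c + 2 * (j : Int)))
        = (done ++ [(List.range m).map (fun j : Nat => c + 2 * (j : Int))])
            ++ List.replicate t (List.replicate m (0:Int)) := by
      simp [List.append_assoc]
    rw [hset]
    have hstart : (done.length : Int) + 1
        = (((done ++ [(List.range m).map (fun j : Nat => c + 2 * (j : Int))]).length : Nat) : Int) := by
      simp
    rw [hstart, ih (done ++ [(List.range m).map (fun j : Nat => c + 2 * (j : Int))]) (c + (m : Int))]
    congr 1
    · rw [List.append_assoc]
      congr 1
      rw [List.range_succ_eq_map]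
      simp only [List.map_cons, List.map_map, List.cons_append, List.nil_append]
      congr 1
      · apply List.map_congr_left; intro j _; push_cast; ring
      · apply List.map_congr_left; intro i _
        simp only [Function.comp_apply]
        apply List.map_congr_left; intro j _
        push_cast; ring
    · push_cast; ring

-- ===== VERDICT (by name: the statement is the Claim_ definition above) =====
theorem manualIncrementingMatrix_spec : Claim_equal_manualIncrementingMatrix := by
  intro n _
  unfold Spec_manualIncrementingMatrix manualIncrementingMatrix manualIncrementingMatrix_alt
  simp only [PySem.List.pyRange_one, Int.sub_zero]
  set M := n.toNat with hM
  have hinit : List.map (fun _x => List.map (fun _y => (0:Int))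
        (List.map (fun k : Nat => (0:Int) + (k:Int)) (List.range M)))
        (List.map (fun k : Nat => (0:Int) + (k:Int)) (List.range M))
      = List.replicate M (List.replicate M (0:Int)) := by
    apply List.eq_replicate_iff.mpr
    refine ⟨by simp, ?_⟩
    intro b hb
    simp only [List.mem_map] at hb
    obtain ⟨_, _, rfl⟩ := hb
    apply List.eq_replicate_iff.mpr
    refine ⟨by simp, ?_⟩
    intro y hy
    simp only [List.mem_map] at hy
    obtain ⟨_, _, rfl⟩ := hy
    rfl
  rw [hinit]
  have hout := pvOuterFold M M ([] : List (List Int)) 0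
  simp only [List.length_nil, Int.natCast_zero, List.nil_append] at hout
  rw [hout]
  simp only [List.map_map]
  rcases Int.lt_or_le n 0 with hn | hn
  · have h0 : M = 0 := by omega
    simp [h0]
  · have hMn : (M : Int) = n := Int.toNat_of_nonneg hn
    apply List.map_congr_left
    intro i _
    simp only [Function.comp_apply]
    apply List.map_congr_left
    intro j _
    simp only [Function.comp_apply]
    rw [hMn]; ring
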